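-- pv_equiv track=rewrite | github.com/emx/sage | integrations/levelup/results/20260301_193831_sqli_1.5/challenges/sage_run_18/app.py | waf_filter
-- ===== SOURCE A (Python) =====
-- def waf_filter(data):
--     # Simple WAF blocking common keywords and spaces in specific contexts
--     if not data:
--         return False
--     forbidden = [' ', 'OR', 'AND', 'SLEEP', 'BENCHMARK']
--     for word in forbidden:
--         if word in data.upper():
--             return True
--     return False
-- ===== SOURCE B (Python) =====
-- def waf_filter(data):
--     # Position-major single pass: at each index of the uppercased text,
--     # test whether any forbidden keyword starts there.
--     text = data.upper()
--     keywords = (' ', 'OR', 'AND', 'SLEEP', 'BENCHMARK')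
--     return any(text.startswith(keywords, i) for i in range(len(text)))
-- ===== Notes on version B (the rewrite author's own statement) =====
-- stated objective: alternative
-- what changed: Keyword-major loop of five separate substring scans replaced by a single position-major pass that tests str.startswith with the keyword tuple at each index of the once-uppercased text.
import Mathlib
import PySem

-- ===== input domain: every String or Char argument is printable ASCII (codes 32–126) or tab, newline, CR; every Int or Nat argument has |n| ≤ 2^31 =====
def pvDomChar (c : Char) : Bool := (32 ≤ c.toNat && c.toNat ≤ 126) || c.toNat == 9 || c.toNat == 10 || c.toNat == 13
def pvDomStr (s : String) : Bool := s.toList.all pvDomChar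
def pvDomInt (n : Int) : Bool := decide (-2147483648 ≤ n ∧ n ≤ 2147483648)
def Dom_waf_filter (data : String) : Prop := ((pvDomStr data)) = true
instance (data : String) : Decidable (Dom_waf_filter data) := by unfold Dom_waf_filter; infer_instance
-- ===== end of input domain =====

-- B replaces A's keyword-major loop of five substring scans by one position-major pass
-- testing each forbidden keyword at every index of the once-uppercased text (alternative, same cost).


-- ===== PORT A =====
-- A's 'for word in forbidden: if word in data.upper(): return True' early-return loop
def wafLoopA (forbidden : List String) (data : String) : Bool :=
  match forbidden with
  | [] => false
  | w :: rest => if PySem.Str.isIn w (PySem.Str.upper data) then true else wafLoopA rest data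

def waf_filter (data : String) : Bool :=
  if data = "" then false
  else wafLoopA [" ", "OR", "AND", "SLEEP", "BENCHMARK"] data

-- ===== PORT B =====
-- the keyword tuple, as lists of chars
def pvKws : List (List Char) :=
  [[' '], ['O','R'], ['A','N','D'], ['S','L','E','E','P'], ['B','E','N','C','H','M','A','R','K']]

-- text.startswith(keywords, i) is ported by hand as 'some keyword is a prefix of text.drop i'
-- (exact for 0 ≤ i, which range(len(text)) guarantees)
def waf_filter_alt (data : String) : Bool :=
  let text := (PySem.Str.upper data).toList
  (PySem.List.pyRange 0 text.length 1).any fun i =>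
    pvKws.any fun k => PySem.Chars.startswith (text.drop i.toNat) k

-- ===== PRECONDITION & SPEC =====
def Spec_waf_filter (data : String) (out : Bool) : Prop := out = waf_filter_alt data
instance (data : String) (out : Bool) : Decidable (Spec_waf_filter data out) := by unfold Spec_waf_filter; infer_instance

-- ===== CLAIM (what is proved, stated in full; the proofs are below) =====
def Claim_equal_waf_filter : Prop := ∀ (data : String), Dom_waf_filter data → Spec_waf_filter data (waf_filter data)

-- ===== LEMMAS AND PROOFS =====

lemma wafLoopA_eq_any (ws : List String) (data : String) :
    wafLoopA ws data = ws.any (fun w => PySem.Str.isIn w (PySem.Str.upper data)) := by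
  induction ws with
  | nil => rfl
  | cons w rest ih => simp [wafLoopA, ih]

lemma kws_nonempty : ∀ k ∈ pvKws, k ≠ [] := by decide

-- B's position scan finds exactly the keywords that occur as infixes of the uppercased text
lemma alt_iff (data : String) :
    waf_filter_alt data = true ↔
      ∃ k ∈ pvKws, PySem.Chars.isIn k (PySem.Str.upper data).toList = true := by
  unfold waf_filter_alt
  simp only [List.any_eq_true, PySem.List.mem_pyRange_one]
  constructor
  · rintro ⟨i, ⟨_, _⟩, k, hk, hsw⟩
    refine ⟨k, hk, ?_⟩
    rw [← PySem.Chars.exists_prefix_drop_iff_isIn]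
    exact ⟨i.toNat, (PySem.Chars.startswith_iff _ _).1 hsw⟩
  · rintro ⟨k, hk, hin⟩
    obtain ⟨j, hj⟩ := (PySem.Chars.exists_prefix_drop_iff_isIn k _).2 hin
    set text := (PySem.Str.upper data).toList with htext
    by_cases hlt : j < text.length
    · exact ⟨(j : Int), ⟨Int.natCast_nonneg j, by exact_mod_cast hlt⟩, k, hk,
        by rw [PySem.Chars.startswith_iff]; simpa using hj⟩
    · exfalso
      have : text.drop j = [] := List.drop_eq_nil_of_le (by omega)
      rw [this] at hj
      exact kws_nonempty k hk (List.prefix_nil.mp hj)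

lemma forbidden_toList :
    ([" ", "OR", "AND", "SLEEP", "BENCHMARK"] : List String).map String.toList = pvKws := by
  decide

-- ===== VERDICT (by name: the statement is the Claim_ definition above) =====
theorem waf_filter_spec : Claim_equal_waf_filter := by
  intro data _
  unfold Spec_waf_filter waf_filter
  split_ifs with h
  · -- empty string: B's range is empty, so B returns false too
    subst h
    decide
  · rw [wafLoopA_eq_any]
    rw [Bool.eq_iff_iff, List.any_eq_true, alt_iff]
    constructor
    · rintro ⟨w, hw, hin⟩
      refine ⟨w.toList, ?_, by simpa using hin⟩
      rw [← forbidden_toList]; exact List.mem_map_of_mem hw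
    · rintro ⟨k, hk, hin⟩
      rw [← forbidden_toList] at hk
      obtain ⟨w, hw, rfl⟩ := List.mem_map.mp hk
      exact ⟨w, hw, by simpa using hin⟩
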